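-- pv_equiv track=rewrite | github.com/tanaylab/sns_paper | borzoi/code/src/model.py | _detect_species_from_path
-- ===== SOURCE A (Python) =====
-- from typing import Tuple
--
-- def _detect_species_from_path(genome_path: str, warn_on_ambiguity: bool = False) -> Tuple[bool, bool]:
--     """Detect species from a genome path string.
--
--     Species detection logic:
--     - If path contains "mm10" or "mouse" -> mouse data
--     - If path contains "hg19", "hg38", or "human" -> human data
--     - If both detected -> mouse takes precedence (with optional warning)
--     - If neither detected -> defaults to human (with optional warning)
--
--     Note: This is a fallback method. Prefer setting model.species explicitly in config.
--
--     Args: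
--         genome_path: Path to genome FASTA file.
--         warn_on_ambiguity: If True, emit warnings for ambiguous or undetected species.
--
--     Returns:
--         Tuple of (is_mouse, is_human).
--     """
--     import warnings
--
--     path_lower = genome_path.lower() if genome_path else ""
--     is_mouse = "mm10" in path_lower or "mouse" in path_lower
--     is_human_explicit = any(tag in path_lower for tag in ["hg19", "hg38", "human"])
--
--     if is_mouse and is_human_explicit:
--         # Ambiguous - path contains both mouse and human indicators
--         if warn_on_ambiguity:
--             warnings.warn(
--                 f"Genome path contains both mouse and human indicators: {genome_path}. "
--                 "Defaulting to mouse based on 'mm10'/'mouse' taking precedence. "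
--                 "Consider setting model.species explicitly in config.",
--                 UserWarning
--             )
--         is_human = False
--     elif is_mouse:
--         is_human = False
--     elif is_human_explicit:
--         is_human = True
--     else:
--         # Neither detected - default to human
--         if warn_on_ambiguity:
--             warnings.warn(
--                 f"Could not detect species from genome path: {genome_path}. "
--                 "Defaulting to human. Set model.species='mouse' or 'human' in config, "
--                 "or add 'mm10', 'mouse', 'hg19', 'hg38', or 'human' to the genome path.",
--                 UserWarning
--             )
--         is_human = True
--
--     return is_mouse, is_human
-- ===== SOURCE B (Python) =====
-- # B: in every branch of A's elif chain is_human equals not is_mouse, so return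
-- # (is_mouse, not is_mouse) directly. A's warnings are a side effect only (not the
-- # return value) and 'warnings' is not an allowed import here, so they are omitted.
-- def _detect_species_from_path(genome_path: str, warn_on_ambiguity: bool = False):
--     path_lower = genome_path.lower() if genome_path else ""
--     is_mouse = "mm10" in path_lower or "mouse" in path_lower
--     return is_mouse, not is_mouse
-- ===== Notes on version B (the rewrite author's own statement) =====
-- stated objective: simpler
-- what changed: B observes that in every branch of A's elif chain is_human equals not is_mouse, so it computes only is_mouse and returns (is_mouse, not is_mouse), dropping the elif chain and the human-tag scan; A's optional warnings are a side effect, not the return value, and are omitted.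
import Mathlib
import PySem

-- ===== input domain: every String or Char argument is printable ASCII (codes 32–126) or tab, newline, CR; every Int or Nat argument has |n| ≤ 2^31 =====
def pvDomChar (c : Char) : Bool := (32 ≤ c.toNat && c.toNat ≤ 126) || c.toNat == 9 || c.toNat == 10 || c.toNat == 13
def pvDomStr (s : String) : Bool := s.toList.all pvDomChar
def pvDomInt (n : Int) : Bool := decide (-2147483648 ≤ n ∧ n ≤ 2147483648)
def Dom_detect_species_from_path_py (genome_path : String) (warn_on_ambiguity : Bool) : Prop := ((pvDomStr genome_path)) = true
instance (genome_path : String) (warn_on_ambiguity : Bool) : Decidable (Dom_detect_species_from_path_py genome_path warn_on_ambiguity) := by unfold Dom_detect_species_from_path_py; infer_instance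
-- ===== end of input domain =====

-- B returns (is_mouse, not is_mouse) directly, since in every branch of A is_human = not is_mouse (simpler decomposition; warnings are side effects only, not modelled here).


-- ===== PORT A =====
def detect_species_from_path_py (genome_path : String) (warn_on_ambiguity : Bool) : Bool × Bool :=
  let path_lower := if genome_path == "" then "" else PySem.Str.lower genome_path
  let is_mouse := PySem.Str.isIn "mm10" path_lower || PySem.Str.isIn "mouse" path_lower
  let is_human_explicit := ["hg19", "hg38", "human"].any (fun tag => PySem.Str.isIn tag path_lower)
  let is_human :=
    if is_mouse && is_human_explicit then false
    else if is_mouse then false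
    else if is_human_explicit then true
    else true
  (is_mouse, is_human)

-- ===== PORT B =====
def detect_species_from_path_py_alt (genome_path : String) (warn_on_ambiguity : Bool) : Bool × Bool :=
  let path_lower := if genome_path == "" then "" else PySem.Str.lower genome_path
  let is_mouse := PySem.Str.isIn "mm10" path_lower || PySem.Str.isIn "mouse" path_lower
  (is_mouse, !is_mouse)

-- ===== PRECONDITION & SPEC =====
def Spec_detect_species_from_path_py (genome_path : String) (warn_on_ambiguity : Bool) (out : Bool × Bool) : Prop := out = detect_species_from_path_py_alt genome_path warn_on_ambiguity
instance (genome_path : String) (warn_on_ambiguity : Bool) (out : Bool × Bool) : Decidable (Spec_detect_species_from_path_py genome_path warn_on_ambiguity out) := by unfold Spec_detect_species_from_path_py; infer_instance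

-- ===== CLAIM (what is proved, stated in full; the proofs are below) =====
def Claim_equal_detect_species_from_path_py : Prop := ∀ (genome_path : String) (warn_on_ambiguity : Bool), Dom_detect_species_from_path_py genome_path warn_on_ambiguity → Spec_detect_species_from_path_py genome_path warn_on_ambiguity (detect_species_from_path_py genome_path warn_on_ambiguity)

-- ===== LEMMAS AND PROOFS =====

-- ===== VERDICT (by name: the statement is the Claim_ definition above) =====
theorem detect_species_from_path_py_spec : Claim_equal_detect_species_from_path_py := by
  intro gp w _
  unfold Spec_detect_species_from_path_py detect_species_from_path_py detect_species_from_path_py_alt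
  simp only [List.any_cons, List.any_nil, Bool.or_false]
  generalize (if gp == "" then "" else PySem.Str.lower gp) = pl
  cases h1 : PySem.Str.isIn "mm10" pl <;>
  cases h2 : PySem.Str.isIn "mouse" pl <;>
  cases h3 : PySem.Str.isIn "hg19" pl <;>
  cases h4 : PySem.Str.isIn "hg38" pl <;>
  cases h5 : PySem.Str.isIn "human" pl <;>
  rfl
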